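-- pv_equiv track=rewrite | github.com/shubjain26/myDSA | Smallest-Pair-Sum-with-Distance-Constraint.py | solve
-- ===== SOURCE A (Python) =====
-- def solve(nums):
--     max_val = max(nums)
--     min_array = [max_val] * len(nums)
--
--     curr_min = nums[-1]
--     for i in range(len(nums)):
--         ptr = len(nums) - i -1
--         curr_min = min(curr_min, nums[ptr])
--         min_array[ptr] = curr_min
--
--     global_min = nums[0] + nums[-1]
--     for i in range(len(nums)-2):
--         curr_min_sum = nums[i] + min_array[i+2]
--         global_min = min(global_min,curr_min_sum)
--
--
--     return global_min
-- ===== SOURCE B (Python) =====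
-- def solve(nums):
--     global_min = nums[0] + nums[-1]
--     prefix_min = nums[0]
--     for j in range(2, len(nums)):
--         global_min = min(global_min, nums[j] + prefix_min)
--         prefix_min = min(prefix_min, nums[j - 1])
--     return global_min
-- ===== Notes on version B (the rewrite author's own statement) =====
-- stated objective: simpler
-- what changed: Replaces A's two passes (building a suffix-minimum array, then scanning pairs against it) by one left-to-right pass that keeps a single running prefix minimum of the elements at least two positions back, removing the auxiliary array and the max(nums) pre-scan.
import Mathlib
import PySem

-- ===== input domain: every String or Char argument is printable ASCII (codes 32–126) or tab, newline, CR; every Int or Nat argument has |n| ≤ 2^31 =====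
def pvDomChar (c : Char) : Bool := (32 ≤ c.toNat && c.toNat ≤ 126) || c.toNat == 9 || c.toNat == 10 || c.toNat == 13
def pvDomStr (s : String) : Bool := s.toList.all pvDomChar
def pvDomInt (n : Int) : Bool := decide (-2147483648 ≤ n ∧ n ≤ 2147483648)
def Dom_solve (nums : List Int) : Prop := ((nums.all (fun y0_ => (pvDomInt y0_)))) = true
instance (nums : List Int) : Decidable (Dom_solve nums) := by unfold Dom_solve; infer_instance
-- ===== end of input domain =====

-- B replaces A's suffix-minimum array (two passes, O(n) extra space) by a single pass
-- with one running prefix-minimum scalar; return values agree on every non-empty list.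

-- ===== PORT A =====
def solve (nums : List Int) : Int :=
  let max_val := (PySem.List.max? nums (fun y => y)).getD 0
  let n := nums.length
  let min_array := List.replicate n max_val
  let curr0 := (PySem.List.pyGet? nums (-1)).getD 0
  let st := (List.range n).foldl (fun (st : Int × List Int) i =>
      let ptr := n - i - 1
      let cm := min st.1 ((PySem.List.pyGet? nums ((ptr : Nat) : Int)).getD 0)
      (cm, st.2.set ptr cm)) (curr0, min_array)
  let g0 := (PySem.List.pyGet? nums 0).getD 0 + (PySem.List.pyGet? nums (-1)).getD 0
  (List.range (n - 2)).foldl (fun g i =>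
      min g ((PySem.List.pyGet? nums ((i : Nat) : Int)).getD 0 +
             (PySem.List.pyGet? st.2 (((i : Nat) : Int) + 2)).getD 0)) g0

-- ===== PORT B =====
def solve_alt (nums : List Int) : Int :=
  let g0 := (PySem.List.pyGet? nums 0).getD 0 + (PySem.List.pyGet? nums (-1)).getD 0
  let p0 := (PySem.List.pyGet? nums 0).getD 0
  let st := (PySem.List.pyRange 2 nums.length 1).foldl (fun (st : Int × Int) j =>
      (min st.1 ((PySem.List.pyGet? nums j).getD 0 + st.2),
       min st.2 ((PySem.List.pyGet? nums (j - 1)).getD 0))) (g0, p0)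
  st.1

-- ===== PRECONDITION & SPEC =====
-- Pre_ excludes exactly the empty list, on which A raises ValueError (from max) and B raises IndexError.
def Pre_solve (nums : List Int) : Prop := nums ≠ []
instance (nums : List Int) : Decidable (Pre_solve nums) := by unfold Pre_solve; infer_instance
def pvWitness_solve : List Int := ([1, -2, 3, 0])

def Spec_solve (nums : List Int) (out : Int) : Prop := out = solve_alt nums
instance (nums : List Int) (out : Int) : Decidable (Spec_solve nums out) := by unfold Spec_solve; infer_instance

-- ===== CLAIM (what is proved, stated in full; the proofs are below) =====
def Claim_equal_solve : Prop := ∀ (nums : List Int), Dom_solve nums → Pre_solve nums → Spec_solve nums (solve nums)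

-- ===== LEMMAS AND PROOFS =====

-- prefix minimum: pm nums k = min of nums[0..k]
def pm (nums : List Int) : Nat → Int
  | 0 => nums.getD 0 0
  | k+1 => min (pm nums k) (nums.getD (k+1) 0)

-- suffix minimum by distance from the end: sm nums t = min of nums[n-1-t..n-1]
def sm (nums : List Int) : Nat → Int
  | 0 => nums.getD (nums.length - 1) 0
  | t+1 => min (sm nums t) (nums.getD (nums.length - 1 - (t+1)) 0)

theorem pm_le (nums : List Int) (i k : Nat) (h : i ≤ k) : pm nums k ≤ nums.getD i 0 := by
  induction k with
  | zero => simp_all [pm]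
  | succ k ih =>
    rcases Nat.lt_or_ge i (k+1) with h' | h'
    · exact le_trans (min_le_left _ _) (ih (by omega))
    · have : i = k+1 := by omega
      subst this; exact min_le_right _ _

theorem pm_attain (nums : List Int) (k : Nat) : ∃ i ≤ k, pm nums k = nums.getD i 0 := by
  induction k with
  | zero => exact ⟨0, le_refl _, rfl⟩
  | succ k ih =>
    obtain ⟨i, hi, he⟩ := ih
    rcases min_cases (pm nums k) (nums.getD (k+1) 0) with ⟨h1, _⟩ | ⟨h1, _⟩
    · exact ⟨i, by omega, by rw [show pm nums (k+1) = min (pm nums k) (nums.getD (k+1) 0) from rfl, h1, he]⟩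
    · exact ⟨k+1, le_refl _, by rw [show pm nums (k+1) = min (pm nums k) (nums.getD (k+1) 0) from rfl, h1]⟩

theorem sm_le (nums : List Int) (s t : Nat) (h : s ≤ t) :
    sm nums t ≤ nums.getD (nums.length - 1 - s) 0 := by
  induction t with
  | zero => simp_all [sm]
  | succ t ih =>
    rcases Nat.lt_or_ge s (t+1) with h' | h'
    · exact le_trans (min_le_left _ _) (ih (by omega))
    · have : s = t+1 := by omega
      subst this; exact min_le_right _ _

theorem sm_attain (nums : List Int) (t : Nat) :
    ∃ s ≤ t, sm nums t = nums.getD (nums.length - 1 - s) 0 := by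
  induction t with
  | zero => exact ⟨0, le_refl _, rfl⟩
  | succ t ih =>
    obtain ⟨s, hs, he⟩ := ih
    rcases min_cases (sm nums t) (nums.getD (nums.length - 1 - (t+1)) 0) with ⟨h1, _⟩ | ⟨h1, _⟩
    · exact ⟨s, by omega, by rw [show sm nums (t+1) = min (sm nums t) (nums.getD (nums.length - 1 - (t+1)) 0) from rfl, h1, he]⟩
    · exact ⟨t+1, le_refl _, by rw [show sm nums (t+1) = min (sm nums t) (nums.getD (nums.length - 1 - (t+1)) 0) from rfl, h1]⟩

-- generic fold-min bounds
theorem foldl_min_le_init (l : List Nat) (h : Nat → Int) (g0 : Int) :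
    l.foldl (fun g i => min g (h i)) g0 ≤ g0 := by
  induction l generalizing g0 with
  | nil => simp
  | cons a l ih => exact le_trans (ih _) (min_le_left _ _)

theorem foldl_min_le_elem (l : List Nat) (h : Nat → Int) (g0 : Int) (i : Nat) (hi : i ∈ l) :
    l.foldl (fun g i => min g (h i)) g0 ≤ h i := by
  induction l generalizing g0 with
  | nil => simp at hi
  | cons a l ih =>
    rcases List.mem_cons.mp hi with rfl | hi'
    · exact le_trans (foldl_min_le_init l h _) (min_le_right _ _)
    · exact ih _ hi'

theorem le_foldl_min (l : List Nat) (h : Nat → Int) (g0 x : Int) (h0 : x ≤ g0)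
    (he : ∀ i ∈ l, x ≤ h i) : x ≤ l.foldl (fun g i => min g (h i)) g0 := by
  induction l generalizing g0 with
  | nil => simpa
  | cons a l ih =>
    exact ih _ (le_min h0 (he a (by simp))) (fun i hi => he i (by simp [hi]))

-- the core identity: both reduced folds compute the same value
theorem folds_eq (nums : List Int) :
    (List.range (nums.length - 2)).foldl
        (fun g i => min g (nums.getD i 0 + sm nums (nums.length - 3 - i))) (pm nums 0 + nums.getD (nums.length - 1) 0)
    = (List.range (nums.length - 2)).foldl
        (fun g k => min g (nums.getD (k+2) 0 + pm nums k)) (pm nums 0 + nums.getD (nums.length - 1) 0) := by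
  have hA := fun i hi => foldl_min_le_elem (List.range (nums.length - 2))
      (fun i => nums.getD i 0 + sm nums (nums.length - 3 - i)) (pm nums 0 + nums.getD (nums.length - 1) 0) i hi
  have hB := fun k hk => foldl_min_le_elem (List.range (nums.length - 2))
      (fun k => nums.getD (k+2) 0 + pm nums k) (pm nums 0 + nums.getD (nums.length - 1) 0) k hk
  apply le_antisymm
  · apply le_foldl_min
    · exact foldl_min_le_init _ _ _
    · intro k hk
      have hk' : k < nums.length - 2 := List.mem_range.mp hk
      obtain ⟨i, hik, he⟩ := pm_attain nums k
      have hmem : i ∈ List.range (nums.length - 2) := List.mem_range.mpr (by omega)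
      refine le_trans (hA i hmem) ?_
      have : sm nums (nums.length - 3 - i) ≤ nums.getD (k+2) 0 := by
        have := sm_le nums (nums.length - 3 - k) (nums.length - 3 - i) (by omega)
        have hidx : nums.length - 1 - (nums.length - 3 - k) = k + 2 := by omega
        rwa [hidx] at this
      rw [he]; omega
  · apply le_foldl_min
    · exact foldl_min_le_init _ _ _
    · intro i hi
      have hi' : i < nums.length - 2 := List.mem_range.mp hi
      obtain ⟨s, hs, he⟩ := sm_attain nums (nums.length - 3 - i)
      set j := nums.length - 1 - s with hj
      have hj2 : 2 ≤ j ∧ j ≤ nums.length - 1 := by omega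
      have hmem : j - 2 ∈ List.range (nums.length - 2) := List.mem_range.mpr (by omega)
      refine le_trans (hB (j - 2) hmem) ?_
      have h1 : pm nums (j - 2) ≤ nums.getD i 0 := pm_le nums i (j - 2) (by omega)
      have h2 : (j - 2) + 2 = j := by omega
      rw [h2, he]
      omega

-- characterization of A's first loop
theorem A_loop (nums : List Int) (maxv : Int) (m : Nat) (hm : m ≤ nums.length) :
    (List.range m).foldl (fun (st : Int × List Int) i =>
        (min st.1 (nums.getD (nums.length - i - 1) 0),
         st.2.set (nums.length - i - 1) (min st.1 (nums.getD (nums.length - i - 1) 0))))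
      (nums.getD (nums.length - 1) 0, List.replicate nums.length maxv)
    = (sm nums (m - 1),
       (List.range nums.length).map (fun k =>
          if nums.length - m ≤ k then sm nums (nums.length - 1 - k) else maxv)) := by
  induction m with
  | zero =>
    simp only [List.range_zero, List.foldl_nil, Prod.mk.injEq]
    refine ⟨rfl, ?_⟩
    apply List.ext_getElem <;> simp
    intro k hk _
    omega
  | succ m ih =>
    rw [List.range_succ, List.foldl_append, ih (by omega)]
    simp only [List.foldl_cons, List.foldl_nil]
    have hcm : min (sm nums (m - 1)) (nums.getD (nums.length - m - 1) 0) = sm nums m := by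
      cases m with
      | zero => simp [sm]
      | succ m' =>
        rw [show nums.length - (m'+1) - 1 = nums.length - 1 - (m'+1+1-1) from by omega]
        rfl
    simp only [Prod.mk.injEq]
    refine ⟨by simpa using hcm, ?_⟩
    rw [show (nums.getD (nums.length - m - 1) 0) = nums.getD (nums.length - m - 1) 0 from rfl]
    rw [hcm]
    apply List.ext_getElem
    · simp
    · intro k hk1 hk2
      simp only [List.getElem_set, List.getElem_map, List.getElem_range]
      have hk : k < nums.length := by simpa using hk1
      by_cases hke : nums.length - m - 1 = k
      · have h5 : nums.length - 1 - k = m := by omega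
        simp only [hke, h5]
        rw [if_pos (show nums.length - (m+1) ≤ k from by omega)]
        simp
      · simp only [if_neg hke]
        have h6 : (nums.length - m ≤ k) ↔ (nums.length - (m+1) ≤ k) := by omega
        simp [h6]

-- bridge: getLast?.getD = getD (len-1)
theorem getLast_getD (nums : List Int) (_h : nums ≠ []) :
    nums.getLast?.getD 0 = nums.getD (nums.length - 1) 0 := by
  rw [List.getLast?_eq_getElem?]
  rfl

-- reduce port A to the clean fold
theorem solve_eq (nums : List Int) (h : nums ≠ []) :
    solve nums = (List.range (nums.length - 2)).foldl
        (fun g i => min g (nums.getD i 0 + sm nums (nums.length - 3 - i)))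
        (pm nums 0 + nums.getD (nums.length - 1) 0) := by
  unfold solve
  simp only [PySem.List.pyGet?_natCast, PySem.List.pyGet?_neg_one, PySem.List.pyGet?_zero,
    getLast_getD nums h]
  rw [show ∀ l : List Int, (fun (st : Int × List Int) i =>
        ((min st.1 (l[l.length - i - 1]?.getD 0)),
         st.2.set (l.length - i - 1) (min st.1 (l[l.length - i - 1]?.getD 0))))
      = (fun (st : Int × List Int) i =>
        (min st.1 (l.getD (l.length - i - 1) 0),
         st.2.set (l.length - i - 1) (min st.1 (l.getD (l.length - i - 1) 0)))) from fun l => rfl]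
  rw [A_loop nums ((PySem.List.max? nums (fun y => y)).getD 0) nums.length (le_refl _)]
  rw [show nums[0]?.getD 0 = pm nums 0 from rfl]
  apply PySem.List.foldl_congr_mem
  intro g i hi
  have hi' : i < nums.length - 2 := List.mem_range.mp hi
  have hcast : ((i : Int) + 2) = ((i + 2 : Nat) : Int) := by push_cast; ring
  rw [hcast, PySem.List.pyGet?_natCast]
  have hlen : i + 2 < nums.length := by omega
  rw [List.getElem?_map (l := List.range nums.length)]
  rw [List.getElem?_range hlen]
  simp only [Option.map_some, Option.getD_some]
  rw [if_pos (show nums.length - nums.length ≤ i + 2 from by omega)]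
  rw [show nums.length - 1 - (i + 2) = nums.length - 3 - i from by omega]
  rfl

-- reduce port B to the clean fold
theorem B_loop (nums : List Int) (m : Nat) : ∀ (s : Nat) (g : Int),
    ((List.range' s m).foldl (fun (st : Int × Int) k =>
        (min st.1 (nums.getD (k+2) 0 + st.2), min st.2 (nums.getD (k+1) 0))) (g, pm nums s))
    = ((List.range' s m).foldl (fun g k => min g (nums.getD (k+2) 0 + pm nums k)) g,
       pm nums (s+m)) := by
  induction m with
  | zero => intro s g; simp
  | succ m ih =>
    intro s g
    rw [List.range'_succ, List.foldl_cons, List.foldl_cons]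
    rw [show (min (pm nums s) (nums.getD (s+1) 0)) = pm nums (s+1) from rfl]
    rw [ih (s+1)]
    rw [show s + 1 + m = s + (m + 1) from by omega]

theorem solve_alt_eq (nums : List Int) (h : nums ≠ []) :
    solve_alt nums = (List.range (nums.length - 2)).foldl
        (fun g k => min g (nums.getD (k+2) 0 + pm nums k))
        (pm nums 0 + nums.getD (nums.length - 1) 0) := by
  unfold solve_alt
  simp only [PySem.List.pyGet?_neg_one, PySem.List.pyGet?_zero, getLast_getD nums h]
  rw [PySem.List.pyRange_one]
  rw [show ((nums.length : Int) - 2).toNat = nums.length - 2 from by omega]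
  rw [List.foldl_map]
  rw [show (fun (st : Int × Int) (k : Nat) =>
        (min st.1 ((PySem.List.pyGet? nums (2 + (k : Int))).getD 0 + st.2),
         min st.2 ((PySem.List.pyGet? nums (2 + (k : Int) - 1)).getD 0)))
      = (fun (st : Int × Int) (k : Nat) =>
        (min st.1 (nums.getD (k+2) 0 + st.2), min st.2 (nums.getD (k+1) 0))) from by
    funext st k
    rw [show (2 + (k : Int)) = ((k + 2 : Nat) : Int) from by push_cast; ring,
        show (((k + 2 : Nat) : Int) - 1) = ((k + 1 : Nat) : Int) from by push_cast; ring,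
        PySem.List.pyGet?_natCast, PySem.List.pyGet?_natCast]
    rfl]
  rw [List.range_eq_range', show nums[0]?.getD 0 = pm nums 0 from rfl]
  rw [B_loop nums (nums.length - 2) 0]

-- ===== VERDICT (by name: the statement is the Claim_ definition above) =====
theorem solve_spec : Claim_equal_solve := by
  intro nums _ hpre
  unfold Spec_solve
  rw [solve_eq nums hpre, solve_alt_eq nums hpre, folds_eq]
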